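-- pv_equiv track=rewrite | github.com/robertogarita/Proyecto-3-POO | FINAL SERVER TEMPORAL.py | Buscador_inicial_2
-- ===== SOURCE A (Python) =====
-- def inversa(matriz):
--     i=0
--     lista_new=[]
--     i=(len(matriz)-1)
--     while(i!=-1):
--         lista_new+=[matriz[i]]
--         i-=1
--     return lista_new
--
-- def Buscador_inicial_2(matriz):
--     ma = inversa(matriz)
--     bandera = 0
--     lista=[]
--     i = 0
--     p = 1
--     while(i<len(matriz)):
--         p = i + 1
--         while(p<len(matriz)):
--             if ma[i][1]==ma[p][1]:
--                 bandera=1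
--                 p+=1
--             else:
--                 p+=1
--         if bandera==0:
--             lista=[ma[i]]+lista
--         i+=1
--         bandera=0
--     return lista
-- ===== SOURCE B (Python) =====
-- def Buscador_inicial_2(matriz):
--     lista = []
--     seen = []
--     for fila in matriz:
--         v = fila[1]
--         if v not in seen:
--             lista.append(fila)
--             seen.append(v)
--     return lista
-- ===== Notes on version B (the rewrite author's own statement) =====
-- stated objective: simpler
-- what changed: Replaced A's reverse-the-matrix helper plus nested later-row scan (and front-prepending) by a single forward pass that appends each row whose [1]-value has not been seen yet, tracking seen values in a list.
-- outside the precondition, e.g. on Buscador_inicial_2([[5]]): A returns [[5]], B raises IndexError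
import Mathlib
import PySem

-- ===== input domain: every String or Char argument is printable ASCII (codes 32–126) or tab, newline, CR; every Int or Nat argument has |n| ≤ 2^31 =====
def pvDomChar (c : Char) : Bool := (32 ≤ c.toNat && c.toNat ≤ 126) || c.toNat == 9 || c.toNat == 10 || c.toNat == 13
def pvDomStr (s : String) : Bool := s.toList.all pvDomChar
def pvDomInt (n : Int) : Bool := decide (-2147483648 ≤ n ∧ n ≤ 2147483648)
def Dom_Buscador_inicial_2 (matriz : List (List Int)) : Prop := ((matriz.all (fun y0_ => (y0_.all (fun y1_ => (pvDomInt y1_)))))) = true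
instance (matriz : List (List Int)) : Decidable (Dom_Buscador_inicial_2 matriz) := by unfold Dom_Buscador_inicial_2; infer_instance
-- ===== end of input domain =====

-- B replaces A's reverse-then-nested-scan (keep rows with no later duplicate in the reversed
-- matrix) by one forward pass keeping the first row for each [1]-value with a 'seen' list;
-- return value only (neither version mutates its argument).

-- ===== PORT A =====
-- helper inversa: while i != -1: lista_new += [matriz[i]]; i -= 1   (i from len-1 downwards)
def inversa (matriz : List (List Int)) : List (List Int) :=
  (List.range matriz.length).foldl
    (fun lista_new k =>
      lista_new ++ [PySem.List.pyGetD matriz ((matriz.length - 1 - k : Nat) : Int) []]) []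

def Buscador_inicial_2 (matriz : List (List Int)) : List (List Int) :=
  let ma := inversa matriz
  (List.range matriz.length).foldl
    (fun lista i =>
      -- inner while p: bandera := 1 once ma[i][1] == ma[p][1] for some p in i+1..len-1
      let bandera : Int :=
        ((List.range matriz.length).drop (i + 1)).foldl
          (fun (b : Int) (p : Nat) =>
            if PySem.List.pyGetD (PySem.List.pyGetD ma (i : Int) []) 1 0 =
               PySem.List.pyGetD (PySem.List.pyGetD ma (p : Int) []) 1 0 then 1 else b) 0
      if bandera = 0 then [PySem.List.pyGetD ma (i : Int) []] ++ lista else lista) []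

-- ===== PORT B =====
def Buscador_inicial_2_alt (matriz : List (List Int)) : List (List Int) :=
  (matriz.foldl
    (fun (acc : List (List Int) × List Int) fila =>
      let v := PySem.List.pyGetD fila 1 0
      if v ∈ acc.2 then acc else (acc.1 ++ [fila], acc.2 ++ [v]))
    ([], [])).1

-- ===== PRECONDITION & SPEC =====
-- Pre_ excludes matrices containing a row of length < 2: there Python A raises IndexError
-- whenever len(matriz) ≥ 2, and on the one remaining shape (a single short row, where A
-- returns) Python B itself raises IndexError reading fila[1].
def Pre_Buscador_inicial_2 (matriz : List (List Int)) : Prop :=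
  ∀ fila ∈ matriz, 2 ≤ fila.length
instance (matriz : List (List Int)) : Decidable (Pre_Buscador_inicial_2 matriz) := by
  unfold Pre_Buscador_inicial_2; infer_instance
def pvWitness_Buscador_inicial_2 : List (List Int) := [[1, 2], [3, 2], [4, 5]]

def Spec_Buscador_inicial_2 (matriz : List (List Int)) (out : List (List Int)) : Prop := out = Buscador_inicial_2_alt matriz
instance (matriz : List (List Int)) (out : List (List Int)) : Decidable (Spec_Buscador_inicial_2 matriz out) := by unfold Spec_Buscador_inicial_2; infer_instance

-- ===== CLAIM (what is proved, stated in full; the proofs are below) =====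
def Claim_equal_Buscador_inicial_2 : Prop := ∀ (matriz : List (List Int)), Dom_Buscador_inicial_2 matriz → Pre_Buscador_inicial_2 matriz → Spec_Buscador_inicial_2 matriz (Buscador_inicial_2 matriz)

-- ===== LEMMAS AND PROOFS =====

-- fila[1] (with an irrelevant total default; under Pre_ every row has length ≥ 2)
def pvVal (fila : List Int) : Int := PySem.List.pyGetD fila 1 0

-- rows of l that have no later row with the same [1]-value (the extra list `post`
-- collects [1]-values considered "later" than all of l)
def keptNLP (post : List Int) : List (List Int) → List (List Int)
  | [] => []
  | r :: rest =>
      if pvVal r ∈ rest.map pvVal ++ post then keptNLP post rest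
      else r :: keptNLP post rest

-- first-occurrence filter: keep r iff its [1]-value is not among `pre` (earlier values)
def firstAux (pre : List Int) : List (List Int) → List (List Int)
  | [] => []
  | r :: rest =>
      if pvVal r ∈ pre then firstAux (pre ++ [pvVal r]) rest
      else r :: firstAux (pre ++ [pvVal r]) rest

theorem inversa_eq (matriz : List (List Int)) : inversa matriz = matriz.reverse := by
  unfold inversa
  rw [PySem.List.foldl_append_singleton_eq_map]
  refine List.ext_getElem (by simp) ?_
  intro i h1 h2
  simp only [List.length_reverse] at h2
  simp only [List.nil_append, List.getElem_map, List.getElem_range, List.getElem_reverse]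
  rw [PySem.List.pyGetD_natCast, List.getD_eq_getElem _ _ (by omega)]

theorem bandera_eq (x : Int) (g : Nat → Int) (l : List Nat) (b : Int) :
    l.foldl (fun b p => if x = g p then (1 : Int) else b) b =
      if l.any (fun p => x == g p) then 1 else b := by
  induction l generalizing b with
  | nil => simp
  | cons p l ih =>
      simp only [List.foldl_cons, List.any_cons, ih]
      by_cases h : x = g p <;> simp [h]

theorem foldl_revfilter (c : Nat → Bool) (g : Nat → List Int) (l : List Nat)
    (acc : List (List Int)) :
    l.foldl (fun lista i => if c i then lista else g i :: lista) acc =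
      ((l.filter (fun i => !c i)).map g).reverse ++ acc := by
  induction l generalizing acc with
  | nil => simp
  | cons i l ih =>
      simp only [List.foldl_cons, List.filter_cons]
      by_cases h : c i <;> simp [h, ih]

theorem range_any_getD (q : List Int → Bool) (l : List (List Int)) :
    (List.range l.length).any (fun p => q (l.getD p [])) = l.any q := by
  induction l with
  | nil => simp
  | cons r rest ih =>
      rw [List.length_cons, List.range_succ_eq_map]
      simp only [List.any_cons, List.any_map, Function.comp_def, List.getD_cons_succ,
        List.getD_cons_zero, ih]

theorem keptNLP_main (ma : List (List Int)) :
    (((List.range ma.length).filter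
        (fun i => !((List.range ma.length).drop (i + 1)).any
            (fun p => pvVal (ma.getD i []) == pvVal (ma.getD p [])))).map
      (fun i => ma.getD i [])) = keptNLP [] ma := by
  induction ma with
  | nil => simp [keptNLP]
  | cons r rest ih =>
      rw [List.length_cons, List.range_succ_eq_map, List.filter_cons]
      have hdrop : ∀ k, ((0 :: (List.range rest.length).map Nat.succ).drop (k + 1))
          = ((List.range rest.length).drop k).map Nat.succ := by
        intro k; rw [List.drop_succ_cons, ← List.map_drop]
      have hc0 : ((0 :: (List.range rest.length).map Nat.succ).drop (0 + 1)).any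
          (fun p => pvVal ((r :: rest).getD 0 []) == pvVal ((r :: rest).getD p []))
          = rest.any (fun t => pvVal r == pvVal t) := by
        rw [hdrop, List.drop_zero, List.any_map]
        simp only [Function.comp_def, List.getD_cons_succ, List.getD_cons_zero]
        exact range_any_getD (fun t => pvVal r == pvVal t) rest
      have hcs : (fun i => !((0 :: (List.range rest.length).map Nat.succ).drop (i + 1)).any
            (fun p => pvVal ((r :: rest).getD i []) == pvVal ((r :: rest).getD p []))) ∘ Nat.succ
          = (fun i => !((List.range rest.length).drop (i + 1)).any
            (fun p => pvVal (rest.getD i []) == pvVal (rest.getD p []))) := by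
        funext i
        simp only [Function.comp_def]
        rw [show i.succ + 1 = (i + 1) + 1 from rfl, hdrop, List.any_map]
        simp only [Function.comp_def, List.getD_cons_succ]
      rw [List.filter_map, hcs]
      simp only [keptNLP, List.append_nil]
      by_cases h : pvVal r ∈ rest.map pvVal
      · have hb : rest.any (fun t => pvVal r == pvVal t) = true := by
          simp only [List.any_eq_true, beq_iff_eq]
          rcases List.mem_map.mp h with ⟨t, ht, hv⟩
          exact ⟨t, ht, hv.symm⟩
        rw [if_pos h, if_neg (by rw [hc0, hb]; simp)]
        rw [List.map_map]
        simpa only [Function.comp_def, List.getD_cons_succ] using ih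
      · have hb : rest.any (fun t => pvVal r == pvVal t) = false := by
          simp only [List.any_eq_false, beq_iff_eq]
          intro t ht hv
          exact h (List.mem_map.mpr ⟨t, ht, hv.symm⟩)
        rw [if_neg h, if_pos (by rw [hc0, hb]; simp)]
        rw [List.map_cons, List.map_map, List.getD_cons_zero]
        refine congrArg (r :: ·) ?_
        simpa only [Function.comp_def, List.getD_cons_succ] using ih

theorem keptNLP_append (xs : List (List Int)) (r : List Int) (post : List Int) :
    keptNLP post (xs ++ [r]) =
      keptNLP (pvVal r :: post) xs ++ (if pvVal r ∈ post then [] else [r]) := by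
  induction xs with
  | nil => simp [keptNLP]
  | cons x xs ih =>
      simp only [List.cons_append, keptNLP, ih]
      have hcond : (pvVal x ∈ (xs ++ [r]).map pvVal ++ post) ↔
          (pvVal x ∈ xs.map pvVal ++ (pvVal r :: post)) := by
        simp [or_comm, or_assoc]
      by_cases h : pvVal x ∈ xs.map pvVal ++ (pvVal r :: post)
      · rw [if_pos (hcond.mpr h), if_pos h]
      · rw [if_neg (fun hh => h (hcond.mp hh)), if_neg h, List.cons_append]

theorem keptNLP_reverse (l : List (List Int)) (post pre : List Int)
    (h : ∀ v, v ∈ post ↔ v ∈ pre) :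
    (keptNLP post l.reverse).reverse = firstAux pre l := by
  induction l generalizing post pre with
  | nil => simp [keptNLP, firstAux]
  | cons r rest ih =>
      rw [List.reverse_cons, keptNLP_append, List.reverse_append]
      have h' : ∀ v, v ∈ pvVal r :: post ↔ v ∈ pre ++ [pvVal r] := by
        intro v; simp [h v, or_comm]
      rw [ih _ _ h']
      simp only [firstAux]
      by_cases hm : pvVal r ∈ pre
      · rw [if_pos ((h _).mpr hm), if_pos hm]; simp
      · rw [if_neg (fun hh => hm ((h _).mp hh)), if_neg hm]; simp

theorem alt_foldl (rows : List (List Int)) (out : List (List Int)) (seen pre : List Int)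
    (h : ∀ v, v ∈ seen ↔ v ∈ pre) :
    (rows.foldl
        (fun (acc : List (List Int) × List Int) fila =>
          if pvVal fila ∈ acc.2 then acc else (acc.1 ++ [fila], acc.2 ++ [pvVal fila]))
        (out, seen)).1 = out ++ firstAux pre rows := by
  induction rows generalizing out seen pre with
  | nil => simp [firstAux]
  | cons fila rows ih =>
      simp only [List.foldl_cons, firstAux]
      by_cases hm : pvVal fila ∈ seen
      · rw [if_pos hm, if_pos ((h _).mp hm)]
        exact ih out seen (pre ++ [pvVal fila]) (by
          intro v
          constructor
          · intro hv; exact List.mem_append_left _ ((h v).mp hv)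
          · intro hv
            rcases List.mem_append.mp hv with hv | hv
            · exact (h v).mpr hv
            · simp only [List.mem_singleton] at hv
              subst hv; exact hm)
      · rw [if_neg hm, if_neg (fun hh => hm ((h _).mpr hh))]
        rw [ih (out ++ [fila]) (seen ++ [pvVal fila]) (pre ++ [pvVal fila]) (by
          intro v; simp [h v])]
        simp

theorem A_eq (matriz : List (List Int)) :
    Buscador_inicial_2 matriz = (keptNLP [] matriz.reverse).reverse := by
  unfold Buscador_inicial_2
  simp only [inversa_eq, PySem.List.pyGetD_natCast, ← pvVal.eq_1]
  rw [show matriz.length = matriz.reverse.length by simp]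
  generalize matriz.reverse = ma
  have hfun : (fun (lista : List (List Int)) (i : Nat) =>
      if ((List.range ma.length).drop (i + 1)).foldl
          (fun b p => if pvVal (ma.getD i []) = pvVal (ma.getD p []) then (1 : Int) else b) 0 = 0
      then [ma.getD i []] ++ lista else lista)
      = (fun (lista : List (List Int)) (i : Nat) =>
        if ((List.range ma.length).drop (i + 1)).any
            (fun p => pvVal (ma.getD i []) == pvVal (ma.getD p [])) then lista
        else ma.getD i [] :: lista) := by
    funext lista i
    rw [bandera_eq (pvVal (ma.getD i [])) (fun p => pvVal (ma.getD p []))]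
    cases h : ((List.range ma.length).drop (i + 1)).any
        (fun p => pvVal (ma.getD i []) == pvVal (ma.getD p []))
    · simp
    · simp
  rw [hfun, foldl_revfilter, keptNLP_main, List.append_nil]

-- ===== VERDICT (by name: the statement is the Claim_ definition above) =====
theorem Buscador_inicial_2_spec : Claim_equal_Buscador_inicial_2 := by
  intro matriz _ _
  unfold Spec_Buscador_inicial_2
  rw [A_eq, keptNLP_reverse _ [] [] (by simp)]
  unfold Buscador_inicial_2_alt
  rw [show (fun (acc : List (List Int) × List Int) fila =>
        let v := PySem.List.pyGetD fila 1 0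
        if v ∈ acc.2 then acc else (acc.1 ++ [fila], acc.2 ++ [v])) =
      (fun (acc : List (List Int) × List Int) fila =>
        if pvVal fila ∈ acc.2 then acc else (acc.1 ++ [fila], acc.2 ++ [pvVal fila]))
    from rfl]
  rw [alt_foldl _ [] [] [] (by simp)]
  simp
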